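-- pv_equiv track=rewrite | github.com/MrBrantCode/unitest_baseline | mut_generate/mist_train_cf/cf_7703/solution.py | delete_primes
-- ===== SOURCE A (Python) =====
-- import math
--
-- def delete_primes(lst):
--     def is_prime(n):
--         if n < 2:
--             return False
--         for i in range(2, int(math.sqrt(n)) + 1):
--             if n % i == 0:
--                 return False
--         return True
--
--     result = []
--     for num in lst:
--         if not is_prime(num):
--             result.append(num)
--     return result
-- ===== SOURCE B (Python) =====
-- import math
--
-- def delete_primes(lst):
--     if not lst:
--         return []
--     m = max(lst)
--     if m < 2:
--         return list(lst)
--     r = math.isqrt(m)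
--     comp = bytearray(r + 1)
--     for p in range(2, r + 1):
--         for q in range(2 * p, r + 1, p):
--             comp[q] = 1
--     primes = [p for p in range(2, r + 1) if not comp[p]]
--     return [x for x in lst if x < 2 or any(p * p <= x and x % p == 0 for p in primes)]
-- ===== Notes on version B (the rewrite author's own statement) =====
-- stated objective: faster
-- what changed: Instead of trial-dividing each element by every integer up to its square root, B computes max(lst) once, builds a sieve of composite flags up to isqrt(max) to obtain the list of primes up to isqrt(max), and then tests each element only against those precomputed primes in a single comprehension pass.
import Mathlib
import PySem

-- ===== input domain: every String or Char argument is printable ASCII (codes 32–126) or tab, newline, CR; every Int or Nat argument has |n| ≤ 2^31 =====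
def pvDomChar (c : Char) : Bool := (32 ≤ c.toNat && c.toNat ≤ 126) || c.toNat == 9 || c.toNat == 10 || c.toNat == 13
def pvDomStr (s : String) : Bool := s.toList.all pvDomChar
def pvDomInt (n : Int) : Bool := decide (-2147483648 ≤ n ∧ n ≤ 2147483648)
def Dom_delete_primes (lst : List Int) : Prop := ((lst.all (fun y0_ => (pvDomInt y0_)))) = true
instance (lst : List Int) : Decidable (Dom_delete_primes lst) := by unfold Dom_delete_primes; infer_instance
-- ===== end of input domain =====

-- B replaces per-element trial division up to sqrt(x) by one sieve up to isqrt(max(lst))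
-- and divides each element only by the precomputed primes (measured faster, constant factor).

-- ===== PORT A =====
-- int(math.sqrt(n)) is ported as Nat.sqrt: exact for the 0 ≤ n ≤ 2^31 admitted by Dom_delete_primes
def pvIsPrime (n : Int) : Bool :=
  if n < 2 then false
  else (PySem.List.pyRange 2 ((n.toNat.sqrt : Int) + 1) 1).all
         (fun i => !(PySem.Int.mod n i == 0))

def delete_primes (lst : List Int) : List Int :=
  lst.foldl (fun result num => if !(pvIsPrime num) then result ++ [num] else result) []

-- ===== PORT B =====
-- comp = bytearray(r+1); for p in range(2,r+1): for q in range(2*p,r+1,p): comp[q] = 1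
-- (bytearray modelled as Array Bool; the written index q is always in range, so
--  setIfInBounds is exact, and the read comp[p] below always has 0 ≤ p < r+1)
def pvSieve (r : Int) : Array Bool :=
  (PySem.List.pyRange 2 (r + 1) 1).foldl
    (fun comp p =>
      (PySem.List.pyRange (2 * p) (r + 1) p).foldl
        (fun a q => a.setIfInBounds q.toNat true) comp)
    (Array.replicate (r + 1).toNat false)

-- primes = [p for p in range(2, r+1) if not comp[p]]
def pvPrimes (r : Int) : List Int :=
  let comp := pvSieve r
  (PySem.List.pyRange 2 (r + 1) 1).filter (fun p => !(comp[p.toNat]?.getD false))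

def delete_primes_alt (lst : List Int) : List Int :=
  match PySem.List.max? lst (fun x => x) with
  | none => []
  | some m =>
    if m < 2 then lst
    else
      let primes := pvPrimes ((m.toNat.sqrt : Nat) : Int)
      lst.filter (fun x =>
        decide (x < 2) || primes.any (fun p => decide (p * p ≤ x) && (PySem.Int.mod x p == 0)))

-- ===== PRECONDITION & SPEC =====
def Spec_delete_primes (lst : List Int) (out : List Int) : Prop := out = delete_primes_alt lst
instance (lst : List Int) (out : List Int) : Decidable (Spec_delete_primes lst out) := by unfold Spec_delete_primes; infer_instance

-- ===== CLAIM (what is proved, stated in full; the proofs are below) =====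
def Claim_equal_delete_primes : Prop := ∀ (lst : List Int), Dom_delete_primes lst → Spec_delete_primes lst (delete_primes lst)

-- ===== LEMMAS AND PROOFS =====

theorem pvToNat_mul {a b p : Int} (ha : 0 ≤ a) (hb : 0 ≤ b) (hab : a * b = p) :
    p.toNat = a.toNat * b.toNat := by
  have h : ((a.toNat * b.toNat : Nat) : Int) = p := by
    push_cast [Int.toNat_of_nonneg ha, Int.toNat_of_nonneg hb]; exact hab
  omega

-- folding the inner mark loops over ps equals one mark loop over the concatenated index lists
theorem pvFoldl_foldl {σ : Type} (f : σ → Int → σ) (g : Int → List Int)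
    (ps : List Int) (s : σ) :
    ps.foldl (fun c p => (g p).foldl f c) s = (ps.flatMap g).foldl f s := by
  induction ps generalizing s with
  | nil => simp
  | cons p ps ih => simp [List.flatMap_cons, List.foldl_append, ih]

theorem pvToList_foldl_set (qs : List Int) (arr : Array Bool) :
    (qs.foldl (fun a q => a.setIfInBounds q.toNat true) arr).toList
      = qs.foldl (fun l q => l.set q.toNat true) arr.toList := by
  induction qs generalizing arr with
  | nil => rfl
  | cons q qs ih => simp [List.foldl_cons, ih, Array.toList_setIfInBounds]

theorem pvGetElem?_foldl_set (qs : List Int) (arr : List Bool) (j : Nat) :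
    (qs.foldl (fun a q => a.set q.toNat true) arr)[j]? =
      if (∃ q ∈ qs, q.toNat = j) ∧ j < arr.length then some true else arr[j]? := by
  induction qs generalizing arr with
  | nil => simp
  | cons q qs ih =>
    rw [List.foldl_cons, ih, List.length_set, List.getElem?_set]
    by_cases h1 : (∃ x ∈ qs, x.toNat = j) ∧ j < arr.length
    · rw [if_pos h1, if_pos ⟨⟨h1.1.choose, List.mem_cons_of_mem _ h1.1.choose_spec.1,
        h1.1.choose_spec.2⟩, h1.2⟩]
    · rw [if_neg h1]
      by_cases h2 : q.toNat = j
      · subst h2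
        by_cases h3 : q.toNat < arr.length
        · rw [if_pos rfl, if_pos h3, if_pos ⟨⟨q, List.mem_cons_self, rfl⟩, h3⟩]
        · rw [if_pos rfl, if_neg h3,
            if_neg (by rintro ⟨-, h⟩; exact h3 h),
            (List.getElem?_eq_none_iff).mpr (by omega)]
      · rw [if_neg h2]
        rw [if_neg (by
          rintro ⟨⟨x, hx, hxj⟩, hj⟩
          rcases List.mem_cons.mp hx with rfl | hx
          · exact h2 hxj
          · exact h1 ⟨⟨x, hx, hxj⟩, hj⟩)]

theorem pvSieve_toList (r : Int) :
    (pvSieve r).toList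
      = ((PySem.List.pyRange 2 (r + 1) 1).flatMap
          (fun a => PySem.List.pyRange (2 * a) (r + 1) a)).foldl
        (fun l q => l.set q.toNat true) (List.replicate (r + 1).toNat false) := by
  unfold pvSieve
  rw [pvFoldl_foldl (fun a q => a.setIfInBounds q.toNat true)
      (fun p => PySem.List.pyRange (2 * p) (r + 1) p)
      (PySem.List.pyRange 2 (r + 1) 1)
      (Array.replicate (r + 1).toNat false),
    pvToList_foldl_set, Array.toList_replicate]

-- the sieve flag at index p (2 ≤ p ≤ r) is true iff p is a product of two factors ≥ 2
theorem pvSieve_flag (r p : Int) (hp2 : 2 ≤ p) (hpr : p ≤ r) :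
    ((pvSieve r)[p.toNat]?.getD false = true)
      ↔ ∃ a b : Int, 2 ≤ a ∧ 2 ≤ b ∧ a * b = p := by
  have hjr : p.toNat < (List.replicate (r + 1).toNat (false : Bool)).length := by
    simp; omega
  have h3 := pvGetElem?_foldl_set
      ((PySem.List.pyRange 2 (r + 1) 1).flatMap
        (fun a => PySem.List.pyRange (2 * a) (r + 1) a))
      (List.replicate (r + 1).toNat false) p.toNat
  rw [← pvSieve_toList r] at h3
  rw [← Array.getElem?_toList, h3]
  constructor
  · intro h
    split_ifs at h with hc
    · obtain ⟨⟨q, hq, hqj⟩, -⟩ := hc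
      obtain ⟨a, ha, hqa⟩ := List.mem_flatMap.mp hq
      rw [PySem.List.mem_pyRange_one] at ha
      have ha0 : 0 < a := by omega
      rw [PySem.List.mem_pyRange_iff_of_pos ha0] at hqa
      obtain ⟨hq1, hq2, c, hc⟩ := hqa
      have hqp : q = p := by omega
      refine ⟨a, c + 2, by omega, by nlinarith, by nlinarith⟩
    · rw [List.getElem?_replicate] at h
      split_ifs at h <;> simp_all
  · rintro ⟨a, b, ha, hb, hab⟩
    rw [if_pos]
    · rfl
    refine ⟨⟨a * b, ?_, by omega⟩, hjr⟩
    refine List.mem_flatMap.mpr ⟨a, ?_, ?_⟩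
    · rw [PySem.List.mem_pyRange_one]
      exact ⟨by omega, by nlinarith⟩
    · rw [PySem.List.mem_pyRange_iff_of_pos (by omega)]
      refine ⟨by nlinarith, by nlinarith, ⟨b - 2, by ring⟩⟩

-- membership in the primes list = primality, for the sieve range
theorem pvMem_primes (r p : Int) (hr : 1 ≤ r) :
    p ∈ pvPrimes r ↔ 2 ≤ p ∧ p ≤ r ∧ Nat.Prime p.toNat := by
  unfold pvPrimes
  rw [List.mem_filter, PySem.List.mem_pyRange_one]
  constructor
  · rintro ⟨⟨hp2, hpr⟩, hflag⟩
    refine ⟨hp2, by omega, ?_⟩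
    rw [Bool.not_eq_eq_eq_not, Bool.not_true] at hflag
    rw [Nat.prime_def_lt']
    refine ⟨by omega, fun m hm2 hmlt hdvd => ?_⟩
    obtain ⟨c, hc⟩ := hdvd
    have : ((pvSieve r)[p.toNat]?.getD false) = true := by
      rw [pvSieve_flag r p hp2 (by omega)]
      refine ⟨(m : Int), (c : Int), by exact_mod_cast hm2, ?_, ?_⟩
      · by_contra hcon
        have hc01 : c = 0 ∨ c = 1 := by omega
        rcases hc01 with rfl | rfl <;> omega
      · rw [show ((m : Int) * (c : Int)) = ((m * c : Nat) : Int) by push_cast; ring,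
          ← hc, Int.toNat_of_nonneg (by omega)]
    simp_all
  · rintro ⟨hp2, hpr, hprime⟩
    refine ⟨⟨hp2, by omega⟩, ?_⟩
    rw [Bool.not_eq_eq_eq_not, Bool.not_true, ← Bool.not_eq_true, pvSieve_flag r p hp2 hpr]
    rintro ⟨a, b, ha, hb, hab⟩
    have h1 : a.toNat ∣ p.toNat := ⟨b.toNat, pvToNat_mul (by omega) (by omega) hab⟩
    rcases (Nat.Prime.eq_one_or_self_of_dvd hprime _ h1) with h | h
    · omega
    · have hap : a = p := by omega
      subst hap
      have h2 : a * 2 ≤ a * b := by nlinarith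
      linarith
-- A's is_prime computes primality
theorem pvIsPrime_iff (x : Int) : pvIsPrime x = true ↔ 2 ≤ x ∧ Nat.Prime x.toNat := by
  unfold pvIsPrime
  split_ifs with hx
  · simp; omega
  · push_neg at hx
    rw [List.all_eq_true]
    constructor
    · intro h
      refine ⟨hx, Nat.prime_def_le_sqrt.mpr ⟨by omega, fun m hm2 hms hdvd => ?_⟩⟩
      have hmem : (m : Int) ∈ PySem.List.pyRange 2 ((x.toNat.sqrt : Int) + 1) 1 := by
        rw [PySem.List.mem_pyRange_one]; omega
      have := h _ hmem
      simp only [Bool.not_eq_eq_eq_not, Bool.not_true, beq_eq_false_iff_ne, ne_eq] at this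
      apply this
      rw [PySem.Int.mod_eq_zero_iff_dvd]
      obtain ⟨c, hc⟩ := hdvd
      exact ⟨(c : Int), by push_cast [← hc]; omega⟩
    · rintro ⟨-, hprime⟩ i hi
      rw [PySem.List.mem_pyRange_one] at hi
      simp only [Bool.not_eq_eq_eq_not, Bool.not_true, beq_eq_false_iff_ne, ne_eq]
      rw [PySem.Int.mod_eq_zero_iff_dvd]
      rintro ⟨c, hc⟩
      have hc0 : 0 < c := by nlinarith
      have hdvd : i.toNat ∣ x.toNat := ⟨c.toNat, pvToNat_mul (by omega) (by omega) hc.symm⟩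
      exact (Nat.prime_def_le_sqrt.mp hprime).2 i.toNat (by omega) (by omega) hdvd

-- B's per-element test agrees with A's (negated) primality test for elements ≤ m
theorem pvKeep_agree (m x : Int) (hm : 2 ≤ m) (hxm : x ≤ m) :
    (decide (x < 2) ||
      (pvPrimes ((m.toNat.sqrt : Nat) : Int)).any
        (fun p => decide (p * p ≤ x) && (PySem.Int.mod x p == 0)))
      = !(pvIsPrime x) := by
  set r : Int := ((m.toNat.sqrt : Nat) : Int) with hrdef
  have hr1 : 1 ≤ r := by
    have : 1 ≤ m.toNat.sqrt := by
      have := Nat.sqrt_le_sqrt (show 2 ≤ m.toNat by omega)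
      simpa using this
    omega
  by_cases hx : x < 2
  · have : pvIsPrime x = false := by
      rw [← Bool.not_eq_true, pvIsPrime_iff]; omega
    simp [hx, this]
  · push_neg at hx
    simp only [decide_eq_false (by omega : ¬ x < 2), Bool.false_or]
    rw [Bool.eq_iff_iff, List.any_eq_true, Bool.not_eq_true', ← Bool.not_eq_true,
      pvIsPrime_iff]
    constructor
    · rintro ⟨p, hpmem, hp⟩
      rw [Bool.and_eq_true, decide_eq_true_eq, beq_iff_eq, PySem.Int.mod_eq_zero_iff_dvd] at hp
      obtain ⟨hppx, hpdvd⟩ := hp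
      rw [pvMem_primes _ _ hr1] at hpmem
      obtain ⟨hp2, hpr, hpprime⟩ := hpmem
      rintro ⟨-, hxprime⟩
      obtain ⟨c, hc⟩ := hpdvd
      have hc0 : 0 < c := by nlinarith
      have : p.toNat ∣ x.toNat := ⟨c.toNat, pvToNat_mul (by omega) (by omega) hc.symm⟩
      rcases Nat.Prime.eq_one_or_self_of_dvd hxprime _ this with h | h
      · omega
      · have : p = x := by omega
        nlinarith
    · intro hnot
      have hxnp : ¬ Nat.Prime x.toNat := fun h => hnot ⟨hx, h⟩
      set q := x.toNat.minFac with hq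
      have hqprime : Nat.Prime q := Nat.minFac_prime (by omega)
      have hqdvd : q ∣ x.toNat := Nat.minFac_dvd _
      have hqsq : q ^ 2 ≤ x.toNat := Nat.minFac_sq_le_self (by omega) hxnp
      have hqr : (q : Int) ≤ r := by
        have h1 : q ≤ x.toNat.sqrt := Nat.le_sqrt.mpr (by nlinarith)
        have h2 : x.toNat.sqrt ≤ m.toNat.sqrt := Nat.sqrt_le_sqrt (by omega)
        rw [hrdef]; exact_mod_cast h1.trans h2
      refine ⟨(q : Int), ?_, ?_⟩
      · rw [pvMem_primes _ _ hr1]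
        refine ⟨by exact_mod_cast hqprime.two_le, hqr, ?_⟩
        simpa using hqprime
      · rw [Bool.and_eq_true, decide_eq_true_eq, beq_iff_eq, PySem.Int.mod_eq_zero_iff_dvd]
        obtain ⟨c, hc⟩ := hqdvd
        constructor
        · have h4 : q * q ≤ x.toNat := by nlinarith
          have h5 : ((q * q : Nat) : Int) ≤ ((x.toNat : Nat) : Int) := by exact_mod_cast h4
          rw [Int.toNat_of_nonneg (by omega : (0:Int) ≤ x)] at h5
          push_cast at h5
          exact h5
        · refine ⟨(c : Int), ?_⟩
          have h6 : ((q * c : Nat) : Int) = x := by rw [← hc, Int.toNat_of_nonneg (by omega)]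
          push_cast at h6
          omega

-- ===== VERDICT (by name: the statement is the Claim_ definition above) =====
theorem delete_primes_spec : Claim_equal_delete_primes := by
  intro lst _
  unfold Spec_delete_primes delete_primes delete_primes_alt
  rw [PySem.List.foldl_append_if_eq_filter (fun num => !(pvIsPrime num)) lst []]
  rw [List.nil_append]
  cases hmax : PySem.List.max? lst (fun x => x) with
  | none =>
    rw [(PySem.List.max?_eq_none_iff lst _).mp hmax]
    rfl
  | some m =>
    have hle : ∀ y ∈ lst, y ≤ m := PySem.List.max?_isMax hmax
    dsimp only
    by_cases hm : m < 2
    · rw [if_pos hm]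
      apply List.filter_eq_self.mpr
      intro x hx
      have : pvIsPrime x = false := by
        rw [← Bool.not_eq_true, pvIsPrime_iff]
        have := hle x hx; omega
      simp [this]
    · rw [if_neg hm]
      apply List.filter_congr
      intro x hx
      exact (pvKeep_agree m x (by omega) (hle x hx)).symm
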